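-- pv_equiv track=rewrite | github.com/MuhammadMaheem/programming-for-Ai-Lab | marks.py | hollow_square_with_two_diagonal_lines
-- ===== SOURCE A (Python) =====
-- def hollow_square_with_two_diagonal_lines(n):
--     if n < 1:
--         return ""
--     result = []
--     for i in range(n):
--         row = ""
--         for j in range(n):
--             if i == 0 or i == n - 1 or j == 0 or j == n - 1 or i == j or i + j == n - 1:
--                 row += "* "
--             else:
--                 row += "  "
--         result.append(row)
--     return "\n".join(result)
-- ===== SOURCE B (Python) =====
-- def hollow_square_with_two_diagonal_lines(n):
--     if n < 1:
--         return ""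
--     rows = []
--     for i in range(n):
--         if i == 0 or i == n - 1:
--             rows.append("".join(["* "] * n))
--         else:
--             cells = ["  "] * n
--             for j in (0, n - 1, i, n - 1 - i):
--                 cells[j] = "* "
--             rows.append("".join(cells))
--     return "\n".join(rows)
-- ===== Notes on version B (the rewrite author's own statement) =====
-- stated objective: faster
-- what changed: B places the star tokens directly (full first/last rows; each interior row overwrites the four marked column indices in a token list and joins it) instead of growing each row string cell by cell while testing every (i,j) against A's multi-part boundary/diagonal predicate.
import Mathlib
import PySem

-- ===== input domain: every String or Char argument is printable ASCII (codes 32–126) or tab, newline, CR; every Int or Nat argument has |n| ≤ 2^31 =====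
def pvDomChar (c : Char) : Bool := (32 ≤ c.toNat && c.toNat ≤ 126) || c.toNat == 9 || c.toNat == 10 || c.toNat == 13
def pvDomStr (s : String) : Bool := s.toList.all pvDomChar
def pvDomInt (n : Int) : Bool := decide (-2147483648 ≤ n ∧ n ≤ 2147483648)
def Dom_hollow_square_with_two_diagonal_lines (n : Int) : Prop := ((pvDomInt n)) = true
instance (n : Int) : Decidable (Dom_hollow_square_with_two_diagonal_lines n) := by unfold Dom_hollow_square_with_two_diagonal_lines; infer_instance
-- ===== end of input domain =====

-- B replaces A's per-cell boundary/diagonal test and repeated string concatenation by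
-- direct placement of the star tokens (full first/last rows; otherwise overwrite the
-- four marked column indices in a token list and join).  Measured faster by the check.

-- ===== PORT A =====
-- inner loop of A: row = ""; for j in range(n): row += "* " / "  "
def pvRowA (n i : Int) : String :=
  (PySem.List.pyRange 0 n 1).foldl
    (fun row j =>
      if i = 0 ∨ i = n - 1 ∨ j = 0 ∨ j = n - 1 ∨ i = j ∨ i + j = n - 1
      then row ++ "* " else row ++ "  ")
    ""

def hollow_square_with_two_diagonal_lines (n : Int) : String :=
  if n < 1 then ""
  else
    let result := (PySem.List.pyRange 0 n 1).foldl
      (fun result i => result ++ [pvRowA n i]) []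
    PySem.Str.join "\n" result

-- ===== PORT B =====
-- one row of B; the indices written by the small `for j in (0, n-1, i, n-1-i)` loop
-- are all nonnegative and in range, so they are kept as Nat
def pvRowB (m i : Nat) : String :=
  if i = 0 ∨ i = m - 1 then
    PySem.Str.join "" (PySem.List.pyRepeat ["* "] (m : Int))
  else
    let cells := ((((PySem.List.pyRepeat ["  "] (m : Int)).set 0 "* ").set (m - 1) "* ").set i "* ").set (m - 1 - i) "* "
    PySem.Str.join "" cells

def hollow_square_with_two_diagonal_lines_alt (n : Int) : String :=
  if n < 1 then ""
  else PySem.Str.join "\n" ((List.range n.toNat).map (pvRowB n.toNat))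

-- ===== PRECONDITION & SPEC =====
def Spec_hollow_square_with_two_diagonal_lines (n : Int) (out : String) : Prop := out = hollow_square_with_two_diagonal_lines_alt n
instance (n : Int) (out : String) : Decidable (Spec_hollow_square_with_two_diagonal_lines n out) := by unfold Spec_hollow_square_with_two_diagonal_lines; infer_instance

-- ===== CLAIM (what is proved, stated in full; the proofs are below) =====
def Claim_equal_hollow_square_with_two_diagonal_lines : Prop := ∀ (n : Int), Dom_hollow_square_with_two_diagonal_lines n → Spec_hollow_square_with_two_diagonal_lines n (hollow_square_with_two_diagonal_lines n)

-- ===== LEMMAS AND PROOFS =====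

-- folding `row += "* " / "  "` is flattening the per-cell token lists
lemma pv_toList_foldl_tok (P : Int → Prop) [DecidablePred P] (l : List Int) (s : String) :
    (l.foldl (fun row j => if P j then row ++ "* " else row ++ "  ") s).toList
      = s.toList ++ (l.map (fun j => if P j then "* ".toList else "  ".toList)).flatten := by
  induction l generalizing s with
  | nil => simp
  | cons a t ih =>
    by_cases h : P a <;> simp [h, ih, String.toList_append]

-- joining on the empty separator is flattening
lemma pv_join_empty (parts : List (List Char)) :
    PySem.Chars.join [] parts = parts.flatten := by
  induction parts with
  | nil => simp [PySem.Chars.join_nil]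
  | cons p rest ih =>
    cases rest with
    | nil => simp [PySem.Chars.join_singleton]
    | cons q t => rw [PySem.Chars.join_cons_cons, ih]; simp

lemma pv_toList_join_empty (parts : List String) :
    (PySem.Str.join "" parts).toList = (parts.map String.toList).flatten := by
  rw [PySem.Str.toList_join]
  have h : "".toList = ([] : List Char) := rfl
  rw [h, pv_join_empty]

-- the token list A computes for row i equals the cell list B builds (generic in the
-- two token values, so it applies both to the strings and to their char lists)
lemma pv_tokens_eq {α : Type} (a b : α) (m i : Nat) (hm : 1 ≤ m) (hi : i < m) :
    (List.range m).map (fun k : Nat =>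
        if (i : Int) = 0 ∨ (i : Int) = (m : Int) - 1 ∨ (0 : Int) + k = 0 ∨
           (0 : Int) + k = (m : Int) - 1 ∨ (i : Int) = (0 : Int) + k ∨
           (i : Int) + ((0 : Int) + k) = (m : Int) - 1
        then a else b)
      = (if i = 0 ∨ i = m - 1 then List.replicate m a
         else ((((List.replicate m b).set 0 a).set (m - 1) a).set i a).set (m - 1 - i) a) := by
  by_cases hb : i = 0 ∨ i = m - 1
  · rw [if_pos hb]
    apply List.ext_getElem
    · simp
    · intro j hj hj'
      simp only [List.getElem_map, List.getElem_range, List.getElem_replicate]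
      rw [if_pos]
      omega
  · rw [if_neg hb]
    apply List.ext_getElem
    · simp
    · intro j hj hj'
      have hjm : j < m := by simpa using hj'
      simp only [List.getElem_map, List.getElem_range, List.getElem_set,
        List.getElem_replicate]
      clear hj hj'
      split_ifs <;> first | rfl | omega

lemma pv_row_eq (m i : Nat) (hm : 1 ≤ m) (hi : i < m) :
    pvRowA (m : Int) (i : Int) = pvRowB m i := by
  rw [← String.toList_inj]
  unfold pvRowA pvRowB
  rw [pv_toList_foldl_tok (fun j => (i : Int) = 0 ∨ (i : Int) = (m : Int) - 1 ∨ j = 0 ∨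
        j = (m : Int) - 1 ∨ (i : Int) = j ∨ (i : Int) + j = (m : Int) - 1),
      PySem.List.pyRange_one, List.map_map]
  have hL : ((List.range ((m : Int) - 0).toNat).map
      ((fun j : Int => if (i : Int) = 0 ∨ (i : Int) = (m : Int) - 1 ∨ j = 0 ∨
          j = (m : Int) - 1 ∨ (i : Int) = j ∨ (i : Int) + j = (m : Int) - 1
        then "* ".toList else "  ".toList) ∘ (fun k : Nat => (0 : Int) + k)))
      = (List.range m).map (fun k : Nat =>
        if (i : Int) = 0 ∨ (i : Int) = (m : Int) - 1 ∨ (0 : Int) + k = 0 ∨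
           (0 : Int) + k = (m : Int) - 1 ∨ (i : Int) = (0 : Int) + k ∨
           (i : Int) + ((0 : Int) + k) = (m : Int) - 1
        then "* ".toList else "  ".toList) := by
    have hm0 : ((m : Int) - 0).toNat = m := by omega
    rw [hm0]
    rfl
  rw [hL, pv_tokens_eq ("* ".toList) ("  ".toList) m i hm hi]
  by_cases hb : i = 0 ∨ i = m - 1
  · rw [if_pos hb, if_pos hb, pv_toList_join_empty, PySem.List.pyRepeat_singleton]
    simp [List.map_replicate]
  · rw [if_neg hb, if_neg hb]
    show _ = (PySem.Str.join "" _).toList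
    rw [pv_toList_join_empty, PySem.List.pyRepeat_singleton]
    simp [List.map_set, List.map_replicate]

-- ===== VERDICT (by name: the statement is the Claim_ definition above) =====
theorem hollow_square_with_two_diagonal_lines_spec : Claim_equal_hollow_square_with_two_diagonal_lines := by
  intro n _
  show hollow_square_with_two_diagonal_lines n = hollow_square_with_two_diagonal_lines_alt n
  unfold hollow_square_with_two_diagonal_lines hollow_square_with_two_diagonal_lines_alt
  by_cases hn : n < 1
  · rw [if_pos hn, if_pos hn]
  · rw [if_neg hn, if_neg hn]
    have hm0 : ((n : Int) - 0).toNat = n.toNat := by omega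
    show PySem.Str.join "\n"
        ((PySem.List.pyRange 0 n 1).foldl (fun result i => result ++ [pvRowA n i]) []) = _
    rw [PySem.List.foldl_append_singleton_eq_map, List.nil_append,
        PySem.List.pyRange_one, List.map_map, hm0]
    congr 1
    apply List.map_congr_left
    intro i hi
    have him : i < n.toNat := List.mem_range.mp hi
    have hm : 1 ≤ n.toNat := by omega
    have hcast : (0 : Int) + i = ((i : Nat) : Int) := by omega
    show pvRowA n ((0 : Int) + i) = pvRowB n.toNat i
    rw [hcast]
    have hn' : ((n.toNat : Nat) : Int) = n := by omega
    rw [← hn']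
    exact pv_row_eq n.toNat i hm him
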